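-- pv_equiv track=rewrite | github.com/hameed1198/LLM_Omicron | other_projects/python_fact.py | find_highest_repeated_value_and_index
-- ===== SOURCE A (Python) =====
-- def find_highest_repeated_value_and_index(lst):
--     if not lst:
--         return None, -1
--     value_counts = {}
--     for i, value in enumerate(lst):
--         if value in value_counts:
--             value_counts[value].append(i)
--         else:
--             value_counts[value] = [i]
--     highest_repeated = None
--     highest_index = -1
--     for value, indices in value_counts.items():
--         if len(indices) > 1:  # Check if the value is repeated
--             if highest_repeated is None or value > highest_repeated:
--                 highest_repeated = value
--                 highest_index = indices[0]  # Return the first occurrence index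
--     return highest_repeated, highest_index
-- ===== SOURCE B (Python) =====
-- def find_highest_repeated_value_and_index(lst):
--     # Single fused pass: first_index records each value's first position;
--     # a value seen again is a repeat and competes for the running maximum.
--     if not lst:
--         return None, -1
--     first_index = {}
--     best_value = None
--     best_index = -1
--     for i, value in enumerate(lst):
--         if value in first_index:
--             if best_value is None or value > best_value:
--                 best_value = value
--                 best_index = first_index[value]
--         else:
--             first_index[value] = i
--     return best_value, best_index
-- ===== Notes on version B (the rewrite author's own statement) =====
-- stated objective: faster
-- what changed: Replaces the two-phase algorithm (build a dict mapping each value to the list of all its indices, then scan the dict items for the max repeated value) by a single fused pass over enumerate that keeps only each value's first index and updates the running best the moment a repeat is seen.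
import Mathlib
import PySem

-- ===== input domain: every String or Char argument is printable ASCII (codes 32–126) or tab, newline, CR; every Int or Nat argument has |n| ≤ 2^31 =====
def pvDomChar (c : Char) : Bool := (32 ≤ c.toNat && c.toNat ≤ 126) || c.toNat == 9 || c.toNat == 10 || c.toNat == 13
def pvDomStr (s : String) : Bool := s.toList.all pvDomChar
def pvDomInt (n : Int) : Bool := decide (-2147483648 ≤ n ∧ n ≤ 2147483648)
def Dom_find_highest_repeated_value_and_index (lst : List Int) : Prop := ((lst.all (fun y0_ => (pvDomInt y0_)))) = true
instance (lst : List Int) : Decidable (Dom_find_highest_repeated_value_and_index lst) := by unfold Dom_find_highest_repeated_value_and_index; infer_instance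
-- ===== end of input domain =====

-- B replaces A's two-phase algorithm (dict of all index lists, then a scan of the items)
-- by one fused pass keeping only each value's first index and a running best; return values proved equal.

-- ===== PORT A =====
-- step of A's second loop: 'if len(indices) > 1: if highest_repeated is None or value > highest_repeated: …'
-- (indices[0] is ported as pyGetD … 0 0; under the 'len > 1' guard the list is nonempty, so Python never raises here)
def pvSelA (st : Option Int × Int) (p : Int × List Int) : Option Int × Int :=
  if p.2.length > 1 then
    match st.1 with
    | none => (some p.1, PySem.List.pyGetD p.2 0 0)
    | some h => if p.1 > h then (some p.1, PySem.List.pyGetD p.2 0 0) else st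
  else st

def find_highest_repeated_value_and_index (lst : List Int) : Option Int × Int :=
  if lst = [] then (none, -1)
  else
    let value_counts :=
      (PySem.List.enumerate lst 0).foldl
        (fun d p =>
          if d.contains p.2 then d.modify p.2 [] (fun l => l ++ [p.1])
          else d.insert p.2 [p.1])
        PySem.Dict.empty
    value_counts.items.foldl pvSelA (none, -1)

-- ===== PORT B =====
-- B's single loop over enumerate(lst): first_index dict, running (best_value, best_index)
def pvLoopB : List (Int × Int) → PySem.Dict Int Int → Option Int × Int → Option Int × Int
  | [], _, st => st
  | p :: rest, fi, st =>
    match fi.get? p.2 with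
    | some j =>
        pvLoopB rest fi
          (match st.1 with
           | none => (some p.2, j)
           | some b => if p.2 > b then (some p.2, j) else st)
    | none => pvLoopB rest (fi.insert p.2 p.1) st

def find_highest_repeated_value_and_index_alt (lst : List Int) : Option Int × Int :=
  if lst = [] then (none, -1)
  else pvLoopB (PySem.List.enumerate lst 0) PySem.Dict.empty (none, -1)

-- ===== PRECONDITION & SPEC =====
def Spec_find_highest_repeated_value_and_index (lst : List Int) (out : Option Int × Int) : Prop := out = find_highest_repeated_value_and_index_alt lst
instance (lst : List Int) (out : Option Int × Int) : Decidable (Spec_find_highest_repeated_value_and_index lst out) := by unfold Spec_find_highest_repeated_value_and_index; infer_instance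

-- ===== CLAIM (what is proved, stated in full; the proofs are below) =====
def Claim_equal_find_highest_repeated_value_and_index : Prop := ∀ (lst : List Int), Dom_find_highest_repeated_value_and_index lst → Spec_find_highest_repeated_value_and_index lst (find_highest_repeated_value_and_index lst)

-- ===== LEMMAS AND PROOFS =====

-- the common 'keep the larger value, with its attached index' step both loops boil down to
def pvSel (st : Option Int × Int) (p : Int × Int) : Option Int × Int :=
  match st.1 with
  | none => (some p.1, p.2)
  | some b => if p.1 > b then (some p.1, p.2) else st

-- fold pvSel over a list of values, each paired with f of itself
def pvBest (f : Int → Int) (l : List Int) (st : Option Int × Int) : Option Int × Int :=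
  l.foldl (fun st v => pvSel st (v, f v)) st

-- the values of rest that were already seen (in pre or earlier in rest), one entry per repeat position
def pvReps : List Int → List Int → List Int
  | _, [] => []
  | pre, v :: t => if v ∈ pre then v :: pvReps (pre ++ [v]) t else pvReps (pre ++ [v]) t

-- the list of positions (from offset s) at which v occurs in l
def pvIdxs (s : Int) (l : List Int) (v : Int) : List Int :=
  ((PySem.List.enumerate l s).filter (fun p => p.2 == v)).map (·.1)

lemma pvSel_sel (st : Option Int × Int) (v m : Int) (f : Int → Int) :
    pvSel (pvSel st (v, f v)) (m, f m) = pvSel st (max v m, f (max v m)) := by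
  rcases st with ⟨b?, j⟩
  rcases b? with _ | b
  · by_cases hmv : m > v
    · simp [pvSel, hmv, max_eq_right (le_of_lt hmv)]
    · simp [pvSel, hmv, max_eq_left (by omega : m ≤ v)]
  · by_cases hvb : v > b
    · by_cases hmv : m > v
      · simp [pvSel, hvb, hmv, max_eq_right (le_of_lt hmv), (by omega : m > b)]
      · simp [pvSel, hvb, hmv, max_eq_left (by omega : m ≤ v)]
    · by_cases hmb : m > b
      · simp [pvSel, hvb, hmb, max_eq_right (by omega : v ≤ m)]
      · have : ¬ max v m > b := by omega
        simp [pvSel, hvb, hmb, this]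
lemma pvFoldlMaxComm (l : List Int) : ∀ a b : Int, l.foldl max (max a b) = max a (l.foldl max b) := by
  induction l with
  | nil => intro a b; simp
  | cons c t ih =>
    intro a b
    simp only [List.foldl_cons]
    rw [max_assoc, ih]
lemma pvBest_cons (f : Int → Int) (v : Int) (t : List Int) (st : Option Int × Int) :
    pvBest f (v :: t) st = pvSel st (t.foldl max v, f (t.foldl max v)) := by
  induction t generalizing v st with
  | nil => simp [pvBest]
  | cons w t ih =>
    show pvBest f (w :: t) (pvSel st (v, f v)) = _
    rw [ih]
    simp only [List.foldl_cons]
    rw [pvSel_sel, pvFoldlMaxComm]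
lemma pvBest_mem_congr (f : Int → Int) (l1 l2 : List Int) (st : Option Int × Int)
    (h : ∀ v, v ∈ l1 ↔ v ∈ l2) : pvBest f l1 st = pvBest f l2 st := by
  cases l1 with
  | nil =>
    cases l2 with
    | nil => rfl
    | cons v2 t2 => exact absurd ((h v2).2 (List.mem_cons_self)) (List.not_mem_nil)
  | cons v1 t1 =>
    cases l2 with
    | nil => exact absurd ((h v1).1 (List.mem_cons_self)) (List.not_mem_nil)
    | cons v2 t2 =>
      rw [pvBest_cons, pvBest_cons]
      have hm : t1.foldl max v1 = t2.foldl max v2 := by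
        have h1m : t1.foldl max v1 = v1 ∨ t1.foldl max v1 ∈ t1 := PySem.List.foldl_max_mem t1 v1
        have h2m : t2.foldl max v2 = v2 ∨ t2.foldl max v2 ∈ t2 := PySem.List.foldl_max_mem t2 v2
        have h1le := PySem.List.le_foldl_max t1 v1
        have h2le := PySem.List.le_foldl_max t2 v2
        have mem1 : t1.foldl max v1 ∈ v2 :: t2 := by
          rw [← h]
          rcases h1m with h1m | h1m
          · rw [h1m]; exact List.mem_cons_self
          · exact List.mem_cons_of_mem _ h1m
        have mem2 : t2.foldl max v2 ∈ v1 :: t1 := by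
          rw [h]
          rcases h2m with h2m | h2m
          · rw [h2m]; exact List.mem_cons_self
          · exact List.mem_cons_of_mem _ h2m
        have le12 : t1.foldl max v1 ≤ t2.foldl max v2 := by
          rcases List.mem_cons.1 mem1 with he | ht
          · rw [he]; exact h2le.1
          · exact h2le.2 _ ht
        have le21 : t2.foldl max v2 ≤ t1.foldl max v1 := by
          rcases List.mem_cons.1 mem2 with he | ht
          · rw [he]; exact h1le.1
          · exact h1le.2 _ ht
        omega
      rw [hm]
lemma pvIdxs_cons (s : Int) (x : Int) (l : List Int) (v : Int) :
    pvIdxs s (x :: l) v = if x = v then s :: pvIdxs (s+1) l v else pvIdxs (s+1) l v := by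
  by_cases h : x = v <;>
    simp [pvIdxs, PySem.List.enumerate_cons, h]
lemma pvIdxs_length (l : List Int) : ∀ (s : Int) (v : Int), (pvIdxs s l v).length = l.count v := by
  induction l with
  | nil => intro s v; simp [pvIdxs, PySem.List.enumerate_nil]
  | cons x t ih =>
    intro s v
    rw [pvIdxs_cons]
    by_cases h : x = v <;> simp [h, ih]
lemma pvIdxs_head (l : List Int) : ∀ (s v : Int), v ∈ l →
    ∃ t, pvIdxs s l v = (s + (List.idxOf v l : Int)) :: t := by
  induction l with
  | nil => intro s v h; simp at h
  | cons x t ih =>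
    intro s v hv
    rw [pvIdxs_cons]
    by_cases h : x = v
    · subst h
      simp [List.idxOf_cons_self]
    · have hvt : v ∈ t := by
        rcases List.mem_cons.1 hv with h' | h'
        · exact absurd h'.symm h
        · exact h'
      rcases ih (s+1) v hvt with ⟨tl, htl⟩
      refine ⟨tl, ?_⟩
      rw [if_neg h, htl, List.idxOf_cons_ne _ (fun hh => h hh)]
      push_cast; ring_nf
lemma pvIdxOf_append (pre t : List Int) (v : Int) (h : v ∉ pre) :
    List.idxOf v (pre ++ v :: t) = pre.length := by
  simp [List.idxOf_append, h]

lemma pvModify_not_contains (d : PySem.Dict Int (List Int)) (k : Int) (f : List Int → List Int)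
    (h : d.contains k = false) : d.modify k [] f = d.insert k (f []) := by
  simp [PySem.Dict.modify, PySem.Dict.insert, h, PySem.Dict.getD_of_not_contains _ _ h]

-- A's grouping loop is exactly the 'modify with default []' loop
lemma pvStepA_eq :
    (fun (d : PySem.Dict Int (List Int)) (p : Int × Int) =>
        if d.contains p.2 then d.modify p.2 [] (fun l => l ++ [p.1])
        else d.insert p.2 [p.1])
      = fun d p => d.modify p.2 [] (fun l => l ++ [p.1]) := by
  funext d p
  by_cases h : d.contains p.2
  · rw [if_pos h]
  · rw [if_neg (by simp [h]), pvModify_not_contains d p.2 _ (by simpa using h)]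
    simp
-- A's dict items, in closed form
lemma pvItemsA (lst : List Int) :
    ((PySem.List.enumerate lst 0).foldl
        (fun d p =>
          if d.contains p.2 then d.modify p.2 [] (fun l => l ++ [p.1])
          else d.insert p.2 [p.1])
        PySem.Dict.empty).items
      = (PySem.Set.ofList lst).map (fun v => (v, pvIdxs 0 lst v)) := by
  rw [pvStepA_eq]
  have hswap : (PySem.List.enumerate lst 0).foldl
      (fun (d : PySem.Dict Int (List Int)) p => d.modify p.2 [] (fun l => l ++ [p.1]))
      PySem.Dict.empty
    = ((PySem.List.enumerate lst 0).map (fun p => (p.2, p.1))).foldl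
      (fun d q => d.modify q.1 [] (fun l => l ++ [q.2])) PySem.Dict.empty := by
    rw [List.foldl_map]
  rw [hswap]
  set E := (PySem.List.enumerate lst 0).map (fun p => (p.2, p.1)) with hE
  set dA := E.foldl (fun (d : PySem.Dict Int (List Int)) q => d.modify q.1 [] (fun l => l ++ [q.2])) PySem.Dict.empty with hdA
  have hkeys : dA.keys = PySem.Set.ofList lst := by
    rw [hdA]
    have := PySem.Dict.keys_foldl_modify_key E (fun q => q.1) [] (fun _ q l => l ++ [q.2]) PySem.Dict.empty
    rw [this]
    have hmap : E.map (fun q => q.1) = lst := by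
      rw [hE, List.map_map]
      exact PySem.List.map_snd_enumerate lst 0
    rw [hmap]
    simp [PySem.Dict.keys_empty, PySem.Set.update_nil_left]
  have hnodup : dA.keys.Nodup := by rw [hkeys]; exact PySem.Set.nodup_ofList lst
  have hgetD : ∀ v, dA.getD v [] = pvIdxs 0 lst v := by
    intro v
    rw [hdA, PySem.Dict.getD_foldl_modify_append]
    simp [hE, List.filter_map, Function.comp_def, pvIdxs]
  rw [PySem.Dict.items_eq_map_keys dA hnodup []]
  rw [hkeys]
  apply List.map_congr_left
  intro v _
  rw [hgetD]
lemma pvA_reduce (lst : List Int) (h : lst ≠ []) :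
    find_highest_repeated_value_and_index lst
      = pvBest (fun v => (List.idxOf v lst : Int))
          ((PySem.Set.ofList lst).filter (fun v => decide (1 < lst.count v))) (none, -1) := by
  rw [find_highest_repeated_value_and_index, if_neg h]
  simp only [pvItemsA]
  rw [List.foldl_map, pvBest, List.foldl_filter]
  apply List.foldl_ext
  intro st v hv
  have hvl : v ∈ lst := (PySem.Set.mem_ofList lst v).1 hv
  have hlen : (pvIdxs 0 lst v).length = lst.count v := pvIdxs_length lst 0 v
  by_cases hc : 1 < lst.count v
  · rcases pvIdxs_head lst 0 v hvl with ⟨t, ht⟩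
    have hget : PySem.List.pyGetD (pvIdxs 0 lst v) 0 0 = (List.idxOf v lst : Int) := by
      rw [ht, PySem.List.pyGetD_zero_cons]; ring
    rcases st with ⟨b?, j⟩
    cases b? <;> simp [pvSelA, pvSel, hlen, hc, hget]
  · simp [pvSelA, hlen, hc]

lemma pvLoopB_inv (lst : List Int) : ∀ (rest pre : List Int) (fi : PySem.Dict Int Int)
    (st : Option Int × Int), pre ++ rest = lst →
    (∀ v : Int, fi.get? v = if v ∈ pre then some (List.idxOf v lst : Int) else none) →
    pvLoopB (PySem.List.enumerate rest (pre.length : Int)) fi st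
      = pvBest (fun v => (List.idxOf v lst : Int)) (pvReps pre rest) st := by
  intro rest
  induction rest with
  | nil => intro pre fi st _ _; simp [PySem.List.enumerate_nil, pvLoopB, pvReps, pvBest]
  | cons v t ih =>
    intro pre fi st hpre hinv
    rw [PySem.List.enumerate_cons, pvLoopB]
    have hlen1 : (pre.length : Int) + 1 = ((pre ++ [v]).length : Int) := by
      simp
    by_cases hm : v ∈ pre
    · rw [hinv v, if_pos hm]
      simp only [hlen1]
      rw [ih (pre ++ [v]) fi _ (by rw [List.append_assoc]; exact hpre)
        (by
          intro w
          rw [hinv w]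
          by_cases hw : w ∈ pre
          · simp [hw, List.mem_append]
          · have : w ∈ pre ++ [v] ↔ w = v := by simp [List.mem_append, hw]
            by_cases hwv : w = v
            · subst hwv; exact absurd hm hw
            · simp [hw, this, hwv])]
      rw [pvReps, if_pos hm]
      rcases st with ⟨b?, j2⟩
      cases b? <;> rfl
    · rw [hinv v, if_neg hm]
      simp only [hlen1]
      have hidx : (List.idxOf v lst : Int) = (pre.length : Int) :=
        congrArg (fun n : Nat => (n : Int)) (by rw [← hpre]; exact pvIdxOf_append pre t v hm)
      rw [ih (pre ++ [v]) (fi.insert v (pre.length : Int)) st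
        (by rw [List.append_assoc]; exact hpre)
        (by
          intro w
          by_cases hwv : w = v
          · subst hwv
            rw [PySem.Dict.get?_insert_self, if_pos (by simp), hidx]
          · rw [PySem.Dict.get?_insert_of_ne _ _ hwv, hinv w]
            have : w ∈ pre ++ [v] ↔ w ∈ pre := by simp [List.mem_append, hwv]
            by_cases hw : w ∈ pre <;> simp [hw, this])]
      rw [pvReps, if_neg hm]

lemma pvMem_reps (v : Int) : ∀ (rest pre : List Int),
    v ∈ pvReps pre rest ↔ v ∈ rest ∧ (v ∈ pre ∨ 2 ≤ rest.count v) := by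
  intro rest
  induction rest with
  | nil => intro pre; simp [pvReps]
  | cons x t ih =>
    intro pre
    by_cases hxv : v = x
    · subst hxv
      by_cases hx : v ∈ pre
      · simp [pvReps, hx]
      · rw [pvReps, if_neg hx, ih]
        have hcnt : (v :: t).count v = t.count v + 1 := by simp
        constructor
        · rintro ⟨hvt, h2⟩
          refine ⟨List.mem_cons_self, Or.inr ?_⟩
          have : 1 ≤ t.count v := List.count_pos_iff.2 hvt
          omega
        · rintro ⟨_, h2⟩
          rcases h2 with h2 | h2
          · exact absurd h2 hx
          · have : 1 ≤ t.count v := by omega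
            exact ⟨List.count_pos_iff.1 this, Or.inl (by simp)⟩
    · have hxv' : ¬ x = v := fun hh => hxv hh.symm
      have hmem : v ∈ pre ++ [x] ↔ v ∈ pre := by simp [List.mem_append, hxv]
      have hcnt : (x :: t).count v = t.count v := by simp [hxv']
      by_cases hx : x ∈ pre
      · rw [pvReps, if_pos hx]
        rw [List.mem_cons]
        rw [ih, hmem]
        simp [hxv, hcnt, List.mem_cons]
      · rw [pvReps, if_neg hx, ih, hmem]
        simp [hxv, hcnt, List.mem_cons]

-- ===== VERDICT (by name: the statement is the Claim_ definition above) =====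
theorem find_highest_repeated_value_and_index_spec : Claim_equal_find_highest_repeated_value_and_index := by
  intro lst _
  unfold Spec_find_highest_repeated_value_and_index
  by_cases h : lst = []
  · simp [find_highest_repeated_value_and_index, find_highest_repeated_value_and_index_alt, h]
  · rw [pvA_reduce lst h]
    rw [find_highest_repeated_value_and_index_alt, if_neg h]
    have hB := pvLoopB_inv lst lst [] PySem.Dict.empty (none, -1) (by simp)
      (by intro v; simp [PySem.Dict.get?_empty])
    simp only [List.length_nil, Int.natCast_zero] at hB
    rw [hB]
    apply pvBest_mem_congr
    intro v
    rw [pvMem_reps]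
    simp only [List.mem_filter, PySem.Set.mem_ofList, List.not_mem_nil, false_or,
      decide_eq_true_eq]
    constructor
    · rintro ⟨hv, hc⟩; exact ⟨hv, by omega⟩
    · rintro ⟨hv, hc⟩; exact ⟨hv, by omega⟩
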